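-- pv_equiv track=rewrite | github.com/v1mal/atmospheric-hero-shaders | scripts/strip-modal-boilerplate.py | remove_modal_html
-- ===== SOURCE A (Python) =====
-- def remove_modal_html(lines):
--     """Remove the <div class="code-modal"> block (handles single- and multi-line)."""
--     result = []
--     i = 0
--     while i < len(lines):
--         line = lines[i]
--         if '<div class="code-modal"' in line:
--             # Track opening/closing div depth to find the matching close
--             depth = line.count("<div") - line.count("</div>")
--             i += 1
--             while i < len(lines) and depth > 0:
--                 depth += lines[i].count("<div") - lines[i].count("</div>")
--                 i += 1
--             # Skip any immediately following blank line left by the removal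
--             if i < len(lines) and lines[i].strip() == "":
--                 i += 1
--             continue
--         result.append(line)
--         i += 1
--     return result
-- ===== SOURCE B (Python) =====
-- def remove_modal_html(lines):
--     """Remove the <div class="code-modal"> block (handles single- and multi-line)."""
--     MARKER = '<div class="code-modal"'
--     out = []
--     rest = lines
--     while True:
--         i = next((k for k, l in enumerate(rest) if MARKER in l), None)
--         if i is None:
--             out.extend(rest)
--             return out
--         out.extend(rest[:i])
--         depth, end = 0, len(rest)
--         for k in range(i, len(rest)):
--             depth += rest[k].count("<div") - rest[k].count("</div>")
--             if depth <= 0: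
--                 end = k + 1
--                 break
--         if end < len(rest) and rest[end].strip() == "":
--             end += 1
--         rest = rest[end:]
-- ===== Notes on version B (the rewrite author's own statement) =====
-- stated objective: alternative
-- what changed: Replaced A's line-by-line index walk with a nested depth-consuming while by a find-split-slice decomposition: repeatedly locate the next marker line with enumerate/next, flush the prefix slice wholesale, compute the block's end index with a bounded for over the suffix, and slice off the block.
import Mathlib
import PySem

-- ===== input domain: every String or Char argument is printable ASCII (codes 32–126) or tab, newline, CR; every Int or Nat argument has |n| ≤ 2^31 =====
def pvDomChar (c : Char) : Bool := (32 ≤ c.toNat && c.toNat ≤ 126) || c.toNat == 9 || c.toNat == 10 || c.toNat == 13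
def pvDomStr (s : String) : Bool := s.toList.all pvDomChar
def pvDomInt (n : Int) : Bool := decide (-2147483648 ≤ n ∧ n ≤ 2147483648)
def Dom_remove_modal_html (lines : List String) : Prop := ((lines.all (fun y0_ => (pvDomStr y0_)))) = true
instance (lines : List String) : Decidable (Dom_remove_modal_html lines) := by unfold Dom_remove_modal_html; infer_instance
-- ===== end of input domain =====

-- B replaces A's line-by-line index walk (with its nested depth-consuming while)
-- by a find/split/slice decomposition: locate the next marker line, flush the
-- prefix slice, compute the block's end index, slice it off, repeat.

-- ===== PORT A =====
def pvMarker : String := "<div class=\"code-modal\""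

-- line.count("<div") - line.count("</div>")
def pvCnt (line : String) : Int :=
  (PySem.Str.count line "<div" : Int) - (PySem.Str.count line "</div>" : Int)

-- A's inner while: consume lines while depth > 0, returning the remaining suffix
def pvSkipA : Int → List String → List String
  | _, [] => []
  | d, l :: r => if d ≤ 0 then l :: r else pvSkipA (d + pvCnt l) r

theorem pvSkipA_length : ∀ (d : Int) (ls : List String), (pvSkipA d ls).length ≤ ls.length := by
  intro d ls
  induction ls generalizing d with
  | nil => simp [pvSkipA]
  | cons l r ih =>
    simp only [pvSkipA]
    split
    · simp
    · exact le_trans (ih _) (by simp)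

-- literal transliteration of A's outer while loop (recursion on the remaining suffix)
def remove_modal_html (lines : List String) : List String :=
  match lines with
  | [] => []
  | l :: r =>
    if PySem.Str.isIn pvMarker l then
      match h : pvSkipA (pvCnt l) r with
      | [] => []
      | b :: r2 =>
        if PySem.Str.strip b == "" then remove_modal_html r2
        else remove_modal_html (b :: r2)
    else l :: remove_modal_html r
termination_by lines.length
decreasing_by
  · have hl := pvSkipA_length (pvCnt l) r
    rw [h] at hl
    simp at hl ⊢
    omega
  · have hl := pvSkipA_length (pvCnt l) r
    rw [h] at hl
    simp at hl ⊢
    omega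
  · simp

-- ===== PORT B =====
-- Source B's inner for over range(i, len(rest)): offset (from i) just past the line
-- where the running depth first drops to ≤ 0, or the length of the suffix
def pvFindEnd (d : Int) (ls : List String) : Nat :=
  match ls with
  | [] => 0
  | l :: r =>
    let d' := d + pvCnt l
    if d' ≤ 0 then 1 else 1 + pvFindEnd d' r

theorem pvFindEnd_pos (d : Int) (l : String) (r : List String) :
    1 ≤ pvFindEnd d (l :: r) := by
  simp only [pvFindEnd]
  split <;> omega

-- Source B's 'if end < len(rest) and rest[end].strip() == "": end += 1'
def pvSkipBlankEnd (e : Nat) (rest : List String) : Nat :=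
  match rest.drop e with
  | [] => e
  | b :: _ => if PySem.Str.strip b == "" then e + 1 else e

theorem pvSkipBlankEnd_ge (e : Nat) (rest : List String) : e ≤ pvSkipBlankEnd e rest := by
  unfold pvSkipBlankEnd
  split
  · omega
  · split <;> omega

-- Source B's outer 'while True' loop: state = (out, rest)
def pvGoB (out : List String) (rest : List String) : List String :=
  match hf : rest.findIdx? (fun l => PySem.Str.isIn pvMarker l) with
  | none => out ++ rest
  | some i =>
    pvGoB (out ++ rest.take i)
      (rest.drop (pvSkipBlankEnd (i + pvFindEnd 0 (rest.drop i)) rest))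
termination_by rest.length
decreasing_by
  have hi : i < rest.length := ((List.findIdx?_eq_some_iff_findIdx_eq).mp hf).1
  have h1 : 1 ≤ pvFindEnd 0 (rest.drop i) := by
    cases hd : rest.drop i with
    | nil =>
      exfalso
      have := congrArg List.length hd
      simp at this
      omega
    | cons b r2 => exact pvFindEnd_pos 0 b r2
  have h2 := pvSkipBlankEnd_ge (i + pvFindEnd 0 (rest.drop i)) rest
  simp only [List.length_drop]
  omega

def remove_modal_html_alt (lines : List String) : List String := pvGoB [] lines

-- ===== PRECONDITION & SPEC =====
def Spec_remove_modal_html (lines : List String) (out : List String) : Prop := out = remove_modal_html_alt lines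
instance (lines : List String) (out : List String) : Decidable (Spec_remove_modal_html lines out) := by unfold Spec_remove_modal_html; infer_instance

-- ===== CLAIM (what is proved, stated in full; the proofs are below) =====
def Claim_equal_remove_modal_html : Prop := ∀ (lines : List String), Dom_remove_modal_html lines → Spec_remove_modal_html lines (remove_modal_html lines)

-- ===== LEMMAS AND PROOFS =====

-- unfolding equations of pvGoB by the value of findIdx?
theorem pvGoB_none {rest : List String}
    (hf : rest.findIdx? (fun l => PySem.Str.isIn pvMarker l) = none) (out : List String) :
    pvGoB out rest = out ++ rest := by
  rw [pvGoB.eq_def]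
  split
  · rfl
  · rename_i i heq
    rw [hf] at heq
    exact absurd heq (by simp)

theorem pvGoB_some {rest : List String} {i : Nat}
    (hf : rest.findIdx? (fun l => PySem.Str.isIn pvMarker l) = some i) (out : List String) :
    pvGoB out rest = pvGoB (out ++ rest.take i)
      (rest.drop (pvSkipBlankEnd (i + pvFindEnd 0 (rest.drop i)) rest)) := by
  rw [pvGoB.eq_def]
  split
  · rename_i heq
    rw [hf] at heq
    exact absurd heq (by simp)
  · rename_i i' heq
    rw [hf] at heq
    cases heq
    rfl

theorem pvSkipBlankEnd_of_drop_nil {e : Nat} {rest : List String}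
    (h : rest.drop e = []) : pvSkipBlankEnd e rest = e := by
  unfold pvSkipBlankEnd
  rw [h]

theorem pvSkipBlankEnd_of_drop_cons {e : Nat} {rest : List String} {b : String} {r2 : List String}
    (h : rest.drop e = b :: r2) :
    pvSkipBlankEnd e rest = if PySem.Str.strip b == "" then e + 1 else e := by
  unfold pvSkipBlankEnd
  rw [h]

-- shifting pvSkipBlankEnd across a cons
theorem pvSkipBlankEnd_cons (m : Nat) (l : String) (r : List String) :
    pvSkipBlankEnd (m + 1) (l :: r) = pvSkipBlankEnd m r + 1 := by
  unfold pvSkipBlankEnd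
  rw [List.drop_succ_cons]
  split
  · rfl
  · split <;> rfl

-- the variant of pvSkipA that always consumes its first line before testing
def pvSkipA2 : Int → List String → List String
  | _, [] => []
  | d, l :: r => if d + pvCnt l ≤ 0 then r else pvSkipA2 (d + pvCnt l) r

theorem drop_pvFindEnd : ∀ (ls : List String) (d : Int),
    ls.drop (pvFindEnd d ls) = pvSkipA2 d ls := by
  intro ls
  induction ls with
  | nil => intro d; rfl
  | cons l r ih =>
    intro d
    simp only [pvFindEnd, pvSkipA2]
    split
    · simp
    · rw [show 1 + pvFindEnd (d + pvCnt l) r = (pvFindEnd (d + pvCnt l) r) + 1 by omega,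
        List.drop_succ_cons]
      exact ih _

theorem pvSkipA_nonpos {d : Int} (ls : List String) (hd : d ≤ 0) : pvSkipA d ls = ls := by
  cases ls with
  | nil => rfl
  | cons l r => simp [pvSkipA, hd]

theorem pvSkipA2_eq_pvSkipA : ∀ (ls : List String) (d : Int), 0 < d →
    pvSkipA2 d ls = pvSkipA d ls := by
  intro ls
  induction ls with
  | nil => intro d _; rfl
  | cons l r ih =>
    intro d hd
    simp only [pvSkipA2, pvSkipA, if_neg (by omega : ¬ d ≤ 0)]
    by_cases h : d + pvCnt l ≤ 0
    · rw [if_pos h, pvSkipA_nonpos r h]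
    · rw [if_neg h, ih _ (by omega)]

-- the composite: Source B's end-of-block slice = A's inner-while remainder
theorem dropEnd_eq_skipA (l : String) (r : List String) :
    (l :: r).drop (pvFindEnd 0 (l :: r)) = pvSkipA (pvCnt l) r := by
  rw [drop_pvFindEnd]
  simp only [pvSkipA2, zero_add]
  by_cases h : pvCnt l ≤ 0
  · rw [if_pos h, pvSkipA_nonpos r h]
  · rw [if_neg h, pvSkipA2_eq_pvSkipA r _ (by omega)]

-- A's post-modal blank-skip step, as a function of the remaining suffix
def pvGoBlank (ls : List String) : List String :=
  match ls with
  | [] => []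
  | b :: r => if PySem.Str.strip b == "" then remove_modal_html r else remove_modal_html (b :: r)

theorem goA_cons_marker {l : String} {r : List String}
    (h : PySem.Str.isIn pvMarker l = true) :
    remove_modal_html (l :: r) = pvGoBlank (pvSkipA (pvCnt l) r) := by
  rw [remove_modal_html, if_pos h]
  cases hs : pvSkipA (pvCnt l) r with
  | nil => simp [pvGoBlank]
  | cons b r2 => simp [pvGoBlank]

theorem goA_cons_not {l : String} {r : List String}
    (h : PySem.Str.isIn pvMarker l = false) :
    remove_modal_html (l :: r) = l :: remove_modal_html r := by
  rw [remove_modal_html, if_neg (by simp only [h]; exact Bool.false_ne_true)]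

theorem goA_no_marker : ∀ (ls : List String),
    ls.findIdx? (fun l => PySem.Str.isIn pvMarker l) = none →
    remove_modal_html ls = ls := by
  intro ls
  induction ls with
  | nil => intro _; rw [remove_modal_html]
  | cons l r ih =>
    intro h
    rw [List.findIdx?_cons] at h
    by_cases hm : PySem.Str.isIn pvMarker l = true
    · rw [if_pos hm] at h; exact absurd h (by simp)
    · rw [if_neg hm] at h
      simp only [Option.map_eq_none_iff] at h
      rw [goA_cons_not (Bool.eq_false_iff.mpr hm), ih h]

-- main invariant of Source B's outer loop
theorem pvGoB_invar : ∀ (n : Nat) (rest : List String), rest.length ≤ n → ∀ (out : List String),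
    pvGoB out rest = out ++ remove_modal_html rest := by
  intro n
  induction n with
  | zero =>
    intro rest hlen out
    have : rest = [] := List.eq_nil_of_length_eq_zero (Nat.le_zero.mp hlen)
    subst this
    rw [pvGoB_none (by simp), remove_modal_html]
  | succ n ih =>
    intro rest hlen out
    cases rest with
    | nil => rw [pvGoB_none (by simp), remove_modal_html]
    | cons l r =>
      have hr : r.length ≤ n := by simpa using Nat.lt_succ_iff.mp (Nat.lt_of_lt_of_le (by simp) hlen)
      by_cases hm : PySem.Str.isIn pvMarker l = true
      · -- marker at the head: findIdx? = some 0
        have hfl : (l :: r).findIdx? (fun l => PySem.Str.isIn pvMarker l) = some 0 := by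
          rw [List.findIdx?_cons, if_pos hm]
        rw [pvGoB_some hfl out]
        simp only [Nat.zero_add, List.drop_zero, List.take_zero, List.append_nil]
        rw [goA_cons_marker hm]
        have hdrop := dropEnd_eq_skipA l r
        have hsl := pvSkipA_length (pvCnt l) r
        cases hs : pvSkipA (pvCnt l) r with
        | nil =>
          rw [hs] at hdrop
          rw [pvSkipBlankEnd_of_drop_nil hdrop, hdrop, pvGoB_none (by simp)]
          simp [pvGoBlank]
        | cons b r2 =>
          rw [hs] at hdrop hsl
          rw [pvSkipBlankEnd_of_drop_cons hdrop]
          simp only [pvGoBlank]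
          by_cases hb : (PySem.Str.strip b == "") = true
          · rw [if_pos hb, if_pos hb]
            have hd2 : (l :: r).drop (pvFindEnd 0 (l :: r) + 1) = r2 := by
              rw [← List.tail_drop, hdrop, List.tail_cons]
            rw [hd2]
            exact ih r2 (by simp at hsl; omega) out
          · rw [if_neg hb, if_neg hb, hdrop]
            exact ih (b :: r2) (by simp at hsl ⊢; omega) out
      · -- no marker at the head
        have hm' : PySem.Str.isIn pvMarker l = false := Bool.eq_false_iff.mpr hm
        rw [goA_cons_not hm']
        cases hf : r.findIdx? (fun l => PySem.Str.isIn pvMarker l) with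
        | none =>
          have hfl : (l :: r).findIdx? (fun l => PySem.Str.isIn pvMarker l) = none := by
            rw [List.findIdx?_cons, if_neg hm, hf]; rfl
          rw [pvGoB_none hfl, goA_no_marker r hf]
        | some j =>
          have hfl : (l :: r).findIdx? (fun l => PySem.Str.isIn pvMarker l) = some (j + 1) := by
            rw [List.findIdx?_cons, if_neg hm, hf]; rfl
          rw [pvGoB_some hfl out]
          rw [List.take_succ_cons, List.drop_succ_cons]
          rw [show j + 1 + pvFindEnd 0 (r.drop j) = (j + pvFindEnd 0 (r.drop j)) + 1 by omega]
          rw [pvSkipBlankEnd_cons, List.drop_succ_cons]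
          rw [show out ++ l :: List.take j r = (out ++ [l]) ++ List.take j r by simp]
          rw [← pvGoB_some hf (out ++ [l])]
          rw [ih r hr (out ++ [l])]
          simp

-- ===== VERDICT (by name: the statement is the Claim_ definition above) =====
theorem remove_modal_html_spec : Claim_equal_remove_modal_html := by
  intro lines _
  unfold Spec_remove_modal_html remove_modal_html_alt
  have := pvGoB_invar lines.length lines le_rfl []
  simpa using this.symm
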